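-- pv_equiv track=rewrite | github.com/Mik33221/NiDUC | plVoterWithSignals.py | plurality_voter_sets
-- ===== SOURCE A (Python) =====
-- def plurality_voter_sets(votes, threshold):
--     subsets = []
--     i = 0
--     while len(votes) > 0 and i < len(votes):
--         subset = [votes[i]]
--         j = i + 1
--         while j < len(votes):
--             if abs(votes[i] - votes[j]) <= threshold:
--                 subset.append(votes[j])
--                 votes.pop(j)
--             else:
--                 j += 1
--         subsets.append(subset)
--         votes.pop(i)
--     return subsets
-- ===== SOURCE B (Python) =====
-- def plurality_voter_sets(votes, threshold):
--     # One left-to-right pass: each vote joins the first existing group whose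
--     # anchor (the group's first element) is within threshold, else starts a
--     # new group.  (Return value only: unlike A, this does not empty `votes`.)
--     groups = []
--     for v in votes:
--         for g in groups:
--             if abs(g[0] - v) <= threshold:
--                 g.append(v)
--                 break
--         else:
--             groups.append([v])
--     return groups
-- ===== Notes on version B (the rewrite author's own statement) =====
-- stated objective: faster
-- what changed: Replaces A's destructive anchor-by-anchor sweep (repeatedly rescanning and popping from the list) with a single left-to-right pass that assigns each vote to the first open group whose anchor is within threshold; return-value equivalence only: A empties the input list in place, B leaves it unmodified.
import Mathlib
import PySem

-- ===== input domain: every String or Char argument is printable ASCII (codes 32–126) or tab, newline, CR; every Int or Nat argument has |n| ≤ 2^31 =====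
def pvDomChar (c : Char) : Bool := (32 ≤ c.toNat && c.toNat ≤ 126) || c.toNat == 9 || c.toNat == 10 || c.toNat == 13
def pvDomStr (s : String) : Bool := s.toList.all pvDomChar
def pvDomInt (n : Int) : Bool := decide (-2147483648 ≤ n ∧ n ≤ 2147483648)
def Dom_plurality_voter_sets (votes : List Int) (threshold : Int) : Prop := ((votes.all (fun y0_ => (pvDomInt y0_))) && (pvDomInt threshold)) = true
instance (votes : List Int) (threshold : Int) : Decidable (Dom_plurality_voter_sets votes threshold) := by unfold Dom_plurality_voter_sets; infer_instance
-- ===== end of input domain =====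

-- B replaces A's destructive anchor-by-anchor sweep by one left-to-right pass assigning each
-- vote to the first open group whose anchor is within threshold.  Return value only:
-- A empties `votes` in place, B does not mutate it.

-- ===== PORT A =====
-- inner `while j < len(votes)` loop: returns (subset, votes) after the loop.
-- fuel is a totality guard only: each step pops an element or advances j, so the
-- `votes.length` fuel passed at the call site is never exhausted.
def pvInnerA (t vi : Int) : Nat → List Int → Nat → List Int → List Int × List Int
  | 0, votes, _j, subset => (subset, votes)
  | fuel + 1, votes, j, subset =>
    if h : j < votes.length then
      if |vi - votes[j]| ≤ t then
        pvInnerA t vi fuel (votes.eraseIdx j) j (subset ++ [votes[j]])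
      else
        pvInnerA t vi fuel votes (j + 1) subset
    else (subset, votes)

-- outer `while len(votes) > 0 and i < len(votes)` loop (i stays 0 in A);
-- fuel is a totality guard only: each iteration removes at least one element.
def pvOuterA (t : Int) : Nat → List Int → Nat → List (List Int) → List (List Int)
  | 0, _votes, _i, subsets => subsets
  | fuel + 1, votes, i, subsets =>
    if h : 0 < votes.length ∧ i < votes.length then
      let r := pvInnerA t (votes[i]'h.2) votes.length votes (i + 1) [votes[i]'h.2]
      pvOuterA t fuel (r.2.eraseIdx i) i (subsets ++ [r.1])
    else subsets

def plurality_voter_sets (votes : List Int) (threshold : Int) : List (List Int) :=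
  pvOuterA threshold votes.length votes 0 []

-- ===== PORT B =====
-- `for g in groups: … break / else: append` — first matching group gets v.
-- groups are invariantly nonempty, so g.headD 0 is Python's g[0].
def pvAdd (t v : Int) : List (List Int) → List (List Int)
  | [] => [[v]]
  | g :: gs => if |g.headD 0 - v| ≤ t then (g ++ [v]) :: gs else g :: pvAdd t v gs

def plurality_voter_sets_alt (votes : List Int) (threshold : Int) : List (List Int) :=
  votes.foldl (fun gs v => pvAdd threshold v gs) []

-- ===== PRECONDITION & SPEC =====
def Spec_plurality_voter_sets (votes : List Int) (threshold : Int) (out : List (List Int)) : Prop := out = plurality_voter_sets_alt votes threshold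
instance (votes : List Int) (threshold : Int) (out : List (List Int)) : Decidable (Spec_plurality_voter_sets votes threshold out) := by unfold Spec_plurality_voter_sets; infer_instance

-- ===== CLAIM (what is proved, stated in full; the proofs are below) =====
def Claim_equal_plurality_voter_sets : Prop := ∀ (votes : List Int) (threshold : Int), Dom_plurality_voter_sets votes threshold → Spec_plurality_voter_sets votes threshold (plurality_voter_sets votes threshold)

-- ===== LEMMAS AND PROOFS =====

-- the common greedy-grouping recursion both programs compute
def pvGroups (t : Int) : List Int → List (List Int)
  | [] => []
  | v :: vs =>
      (v :: vs.filter (fun x => |v - x| ≤ t)) ::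
        pvGroups t (vs.filter (fun x => ¬(|v - x| ≤ t)))
termination_by l => l.length
decreasing_by
  have h := List.length_filter_le (fun (x : {x // x ∈ vs}) => decide (t < |v - (x : Int)|)) vs.attach
  simp at h ⊢
  omega

theorem pvEraseAt (x : Int) (bs : List Int) : ∀ (front : List Int),
    (front ++ x :: bs).eraseIdx front.length = front ++ bs := by
  intro front
  induction front with
  | nil => simp
  | cons y ys ih => simp [ih]

theorem pvInnerA_split (t vi : Int) (back : List Int) : ∀ (fuel : Nat) (front s : List Int),
    back.length ≤ fuel →
    pvInnerA t vi fuel (front ++ back) front.length s =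
      (s ++ back.filter (fun x => |vi - x| ≤ t),
       front ++ back.filter (fun x => ¬(|vi - x| ≤ t))) := by
  induction back with
  | nil =>
    intro fuel front s _
    cases fuel with
    | zero => simp [pvInnerA]
    | succ f =>
      rw [pvInnerA]
      have hlen : ¬ front.length < (front ++ ([] : List Int)).length := by simp
      rw [dif_neg hlen]
      simp
  | cons x bs ih =>
    intro fuel front s hf
    cases fuel with
    | zero => simp at hf
    | succ f =>
      rw [pvInnerA]
      have hlen : front.length < (front ++ x :: bs).length := by simp
      rw [dif_pos hlen]
      have hget : (front ++ x :: bs)[front.length]'hlen = x := by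
        simp [List.getElem_append_right]
      rw [hget]
      have hf' : bs.length ≤ f := by simp at hf; omega
      by_cases hp : |vi - x| ≤ t
      · rw [if_pos hp, pvEraseAt]
        rw [ih f front (s ++ [x]) hf']
        simp [List.filter_cons, hp]
      · rw [if_neg hp]
        have h2 := ih f (front ++ [x]) s hf'
        simp only [List.append_assoc, List.cons_append, List.nil_append,
          List.length_append, List.length_cons, List.length_nil] at h2
        rw [h2]
        simp [List.filter_cons, hp]

theorem pvOuterA_eq (t : Int) : ∀ (fuel : Nat) (votes : List Int), votes.length ≤ fuel →
    ∀ acc, pvOuterA t fuel votes 0 acc = acc ++ pvGroups t votes := by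
  intro fuel
  induction fuel with
  | zero =>
    intro votes hlen acc
    have hv : votes = [] := List.eq_nil_of_length_eq_zero (Nat.le_zero.mp hlen)
    subst hv; simp [pvOuterA, pvGroups]
  | succ n ih =>
    intro votes hlen acc
    match votes with
    | [] => simp [pvOuterA, pvGroups]
    | v :: vs =>
      rw [pvOuterA]
      have h : 0 < (v :: vs).length ∧ 0 < (v :: vs).length := by simp
      rw [dif_pos h]
      have hs := pvInnerA_split t v vs (v :: vs).length [v] [v] (by simp)
      simp only [List.cons_append, List.nil_append, List.length_cons, List.length_nil] at hs
      simp only [List.length_cons, List.getElem_cons_zero, hs, List.eraseIdx_cons_zero]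
      have hle : (vs.filter (fun x => decide ¬(|v - x| ≤ t))).length ≤ n := by
        have := List.length_filter_le (fun x => decide ¬(|v - x| ≤ t)) vs
        simp at hlen; omega
      rw [ih _ hle, pvGroups]
      simp

theorem pvHeadD_append (g : List Int) (v : Int) (hg : g ≠ []) :
    (g ++ [v]).headD 0 = g.headD 0 := by
  cases g with
  | nil => exact absurd rfl hg
  | cons a l => simp

theorem pvFold_cons (t : Int) (vs : List Int) : ∀ (g : List (Int)) (gs : List (List Int)), g ≠ [] →
    List.foldl (fun gs v => pvAdd t v gs) (g :: gs) vs =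
      (g ++ vs.filter (fun x => |g.headD 0 - x| ≤ t)) ::
        List.foldl (fun gs v => pvAdd t v gs) gs (vs.filter (fun x => ¬(|g.headD 0 - x| ≤ t))) := by
  induction vs with
  | nil => intro g gs hg; simp
  | cons v vs ih =>
    intro g gs hg
    by_cases hp : |g.headD 0 - v| ≤ t
    · simp only [List.foldl_cons, pvAdd, if_pos hp]
      rw [ih (g ++ [v]) gs (by simp), pvHeadD_append g v hg]
      simp only [List.headD_eq_head?_getD] at hp
      simp [List.filter_cons, hp, not_lt.mpr hp]
    · simp only [List.foldl_cons, pvAdd, if_neg hp]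
      rw [ih g (pvAdd t v gs) hg]
      simp only [List.headD_eq_head?_getD] at hp
      have hlt := not_le.mp hp
      simp [hlt, List.foldl_cons]

theorem pvAlt_eq (t : Int) : ∀ (n : Nat) (votes : List Int), votes.length ≤ n →
    plurality_voter_sets_alt votes t = pvGroups t votes := by
  intro n
  induction n with
  | zero =>
    intro votes hlen
    have hv : votes = [] := List.eq_nil_of_length_eq_zero (Nat.le_zero.mp hlen)
    subst hv; simp [plurality_voter_sets_alt, pvGroups]
  | succ n ih =>
    intro votes hlen
    match votes with
    | [] => simp [plurality_voter_sets_alt, pvGroups]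
    | v :: vs =>
      unfold plurality_voter_sets_alt
      simp only [List.foldl_cons, pvAdd]
      rw [pvFold_cons t vs [v] [] (by simp)]
      have hle : (vs.filter (fun x => decide ¬(|([v] : List Int).headD 0 - x| ≤ t))).length ≤ n := by
        have := List.length_filter_le (fun x => decide ¬(|([v] : List Int).headD 0 - x| ≤ t)) vs
        simp at hlen; omega
      have ih2 := ih _ hle
      unfold plurality_voter_sets_alt at ih2
      rw [ih2, pvGroups]
      simp

-- ===== VERDICT (by name: the statement is the Claim_ definition above) =====
theorem plurality_voter_sets_spec : Claim_equal_plurality_voter_sets := by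
  intro votes threshold _
  unfold Spec_plurality_voter_sets
  show pvOuterA threshold votes.length votes 0 [] = plurality_voter_sets_alt votes threshold
  rw [pvOuterA_eq threshold votes.length votes le_rfl, pvAlt_eq threshold votes.length votes le_rfl, List.nil_append]
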